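-- pv_equiv track=rewrite | github.com/Chaunecy/ReSeg-PCFG | scorer.py | rm_substr
-- ===== SOURCE A (Python) =====
-- from typing import List, Tuple, TextIO, Any, Dict
--
-- def rm_substr(struct: str, rm: List[Tuple[int, int]]) -> str:
--     res = ""
--     for i, s in enumerate(struct):
--         need_rm = False
--         for start, span in rm:
--             if start <= i < start + span:
--                 need_rm = True
--                 break
--         if not need_rm:
--             res += s
--     return res
-- ===== SOURCE B (Python) =====
-- def rm_substr(struct, rm):
--     n = len(struct)
--     removed = set()
--     for start, span in rm:
--         removed.update(range(max(start, 0), min(start + span, n)))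
--     return "".join(s for i, s in enumerate(struct) if i not in removed)
-- ===== Notes on version B (the rewrite author's own statement) =====
-- stated objective: faster
-- what changed: Instead of scanning every interval for every character (nested loops), B materialises the set of removed positions once by expanding each interval clipped to [0, len), then keeps characters in a single pass with an O(1) set membership test.
import Mathlib
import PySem

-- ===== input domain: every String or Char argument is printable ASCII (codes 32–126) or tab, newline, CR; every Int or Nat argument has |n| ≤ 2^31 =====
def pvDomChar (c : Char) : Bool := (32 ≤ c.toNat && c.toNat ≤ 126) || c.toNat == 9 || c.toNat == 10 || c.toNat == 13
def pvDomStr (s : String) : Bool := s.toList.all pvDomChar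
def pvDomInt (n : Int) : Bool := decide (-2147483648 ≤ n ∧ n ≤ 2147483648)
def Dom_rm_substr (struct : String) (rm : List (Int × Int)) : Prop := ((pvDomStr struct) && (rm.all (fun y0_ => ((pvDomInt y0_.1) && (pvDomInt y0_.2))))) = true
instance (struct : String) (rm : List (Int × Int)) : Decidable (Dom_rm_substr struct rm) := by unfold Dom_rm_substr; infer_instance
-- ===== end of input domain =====

-- B replaces A's per-character scan over all intervals with a set of removed
-- positions built once from the intervals (clipped to the string), then one pass.

-- ===== PORT A =====
-- for i, s in enumerate(struct): flag loop with break = List.any; res += s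
def rm_substr (struct : String) (rm : List (Int × Int)) : String :=
  String.ofList ((PySem.List.enumerate struct.toList 0).foldl
    (fun res p =>
      let need_rm := rm.any (fun q => decide (q.1 ≤ p.1 ∧ p.1 < q.1 + q.2))
      if need_rm then res else res ++ [p.2]) [])

-- ===== PORT B =====
-- removed = set(); for start, span in rm: removed.update(range(max(start,0), min(start+span,n)))
-- then "".join(s for i, s in enumerate(struct) if i not in removed)
def rm_substr_alt (struct : String) (rm : List (Int × Int)) : String :=
  let n : Int := struct.toList.length
  let removed : PySem.Set Int := rm.foldl
    (fun s q => PySem.Set.update s (PySem.List.pyRange (max q.1 0) (min (q.1 + q.2) n) 1))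
    PySem.Set.empty
  String.ofList (((PySem.List.enumerate struct.toList 0).filter
    (fun p => ! removed.contains p.1)).map (fun p => p.2))

-- ===== PRECONDITION & SPEC =====
def Spec_rm_substr (struct : String) (rm : List (Int × Int)) (out : String) : Prop := out = rm_substr_alt struct rm
instance (struct : String) (rm : List (Int × Int)) (out : String) : Decidable (Spec_rm_substr struct rm out) := by unfold Spec_rm_substr; infer_instance

-- ===== CLAIM (what is proved, stated in full; the proofs are below) =====
def Claim_equal_rm_substr : Prop := ∀ (struct : String) (rm : List (Int × Int)), Dom_rm_substr struct rm → Spec_rm_substr struct rm (rm_substr struct rm)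

-- ===== LEMMAS AND PROOFS =====

-- membership in B's accumulated removed set
theorem mem_removed_foldl (n : Int) (rm : List (Int × Int)) (s : PySem.Set Int) (i : Int) :
    i ∈ rm.foldl
      (fun s q => PySem.Set.update s (PySem.List.pyRange (max q.1 0) (min (q.1 + q.2) n) 1)) s
    ↔ i ∈ s ∨ ∃ q ∈ rm, max q.1 0 ≤ i ∧ i < min (q.1 + q.2) n := by
  induction rm generalizing s with
  | nil => simp
  | cons q rm ih =>
    simp only [List.foldl_cons, ih, PySem.Set.mem_update, PySem.List.mem_pyRange_one,
      List.mem_cons]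
    constructor
    · rintro ((h | h) | ⟨r, hr, h⟩)
      · exact Or.inl h
      · exact Or.inr ⟨q, Or.inl rfl, h⟩
      · exact Or.inr ⟨r, Or.inr hr, h⟩
    · rintro (h | ⟨r, (rfl | hr), h⟩)
      · exact Or.inl (Or.inl h)
      · exact Or.inl (Or.inr h)
      · exact Or.inr ⟨r, hr, h⟩

-- ===== VERDICT (by name: the statement is the Claim_ definition above) =====
theorem rm_substr_spec : Claim_equal_rm_substr := by
  intro struct rm _
  unfold Spec_rm_substr rm_substr rm_substr_alt
  have hfold :
      (PySem.List.enumerate struct.toList 0).foldl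
        (fun res p =>
          let need_rm := rm.any (fun q => decide (q.1 ≤ p.1 ∧ p.1 < q.1 + q.2))
          if need_rm then res else res ++ [p.2]) []
      = List.map (fun p => p.2)
          (List.filter (fun p => ! rm.any (fun q => decide (q.1 ≤ p.1 ∧ p.1 < q.1 + q.2)))
            (PySem.List.enumerate struct.toList 0)) := by
    rw [show (fun (res : List Char) (p : Int × Char) =>
          let need_rm := rm.any (fun q => decide (q.1 ≤ p.1 ∧ p.1 < q.1 + q.2))
          if need_rm then res else res ++ [p.2])
        = (fun res p =>
          if (! rm.any (fun q => decide (q.1 ≤ p.1 ∧ p.1 < q.1 + q.2))) = true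
          then res ++ [p.2] else res) from by
        funext res p
        cases hb : rm.any (fun q => decide (q.1 ≤ p.1 ∧ p.1 < q.1 + q.2)) <;> simp [hb]]
    exact PySem.List.foldl_append_if _ _ _ _
  rw [hfold]
  refine congrArg String.ofList (congrArg (List.map _) (List.filter_congr ?_))
  intro p hp
  obtain ⟨k, hk, rfl⟩ := (PySem.List.mem_enumerate_iff _ _ _).1 hp
  have hmem := mem_removed_foldl (struct.toList.length : Int) rm PySem.Set.empty ((0 : Int) + k)
  have hcontains : (PySem.Set.contains
      (rm.foldl (fun s q => PySem.Set.update s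
        (PySem.List.pyRange (max q.1 0) (min (q.1 + q.2) (struct.toList.length : Int)) 1))
        PySem.Set.empty) ((0 : Int) + k)) = true
      ↔ ∃ q ∈ rm, max q.1 0 ≤ (0 : Int) + k ∧ (0 : Int) + k < min (q.1 + q.2) (struct.toList.length : Int) := by
    rw [PySem.Set.contains_iff, hmem]
    simp [PySem.Set.empty]
  congr 1
  rw [Bool.eq_iff_iff, List.any_eq_true, hcontains]
  constructor
  · rintro ⟨q, hq, h⟩
    rw [decide_eq_true_eq] at h
    exact ⟨q, hq, by omega⟩
  · rintro ⟨q, hq, h⟩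
    exact ⟨q, hq, by rw [decide_eq_true_eq]; omega⟩
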